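-- pv_equiv track=rewrite | github.com/HungryPoitrasths/mybenchmark | scripts/run_vlm_referability.py | _normalize_attachment_pair_key
-- ===== SOURCE A (Python) =====
-- def _normalize_attachment_pair_key(
--     pairs: list[list[int]] | tuple[tuple[int, int], ...] | None,
-- ) -> tuple[tuple[int, int], ...]:
--     return tuple(
--         sorted(
--             {
--                 (int(pair[0]), int(pair[1]))
--                 for pair in (pairs or [])
--                 if isinstance(pair, (list, tuple)) and len(pair) == 2
--             }
--         )
--     )
-- ===== SOURCE B (Python) =====
-- def _insert_sorted_unique(res, item):
--     """Insert item into the strictly sorted list res, skipping duplicates."""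
--     if not res:
--         return [item]
--     head = res[0]
--     if item < head:
--         return [item] + res
--     if item == head:
--         return res
--     return [head] + _insert_sorted_unique(res[1:], item)
--
--
-- def _normalize_attachment_pair_key(
--     pairs: list[list[int]] | tuple[tuple[int, int], ...] | None,
-- ) -> tuple[tuple[int, int], ...]:
--     result = []
--     for pair in (pairs or []):
--         if isinstance(pair, (list, tuple)) and len(pair) == 2:
--             result = _insert_sorted_unique(result, (int(pair[0]), int(pair[1])))
--     return tuple(result)
-- ===== Notes on version B (the rewrite author's own statement) =====
-- stated objective: alternative
-- what changed: B never builds a set and never calls sorted(): it maintains a sorted duplicate-free list as its single accumulator and places each valid pair by recursive ordered insertion, so sorting and dedup happen incrementally during the one traversal of the input.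
import Mathlib
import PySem

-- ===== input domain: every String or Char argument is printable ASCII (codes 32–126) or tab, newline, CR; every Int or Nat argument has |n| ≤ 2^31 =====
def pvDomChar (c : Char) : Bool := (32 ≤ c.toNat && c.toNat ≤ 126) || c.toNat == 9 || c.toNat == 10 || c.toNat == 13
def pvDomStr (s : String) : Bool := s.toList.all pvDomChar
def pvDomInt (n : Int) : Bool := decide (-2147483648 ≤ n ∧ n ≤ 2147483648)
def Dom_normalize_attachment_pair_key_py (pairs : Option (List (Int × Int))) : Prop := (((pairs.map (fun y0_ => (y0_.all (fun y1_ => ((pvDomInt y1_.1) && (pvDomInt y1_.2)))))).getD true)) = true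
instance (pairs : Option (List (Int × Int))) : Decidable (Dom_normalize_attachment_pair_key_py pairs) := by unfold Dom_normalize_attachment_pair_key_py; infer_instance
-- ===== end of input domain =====

-- B builds the sorted unique result by ordered insertion (no set, no sort call); proved equal to A on the whole domain.

-- ===== PORT A =====
-- On the typed domain List (Int × Int) the 'isinstance(pair,(list,tuple)) and len(pair)==2'
-- filter is always true and int() on an int is the identity, so the comprehension maps each
-- pair to (pair[0], pair[1]).  Python's tuple comparison is lexicographic; the sort key
-- 'toLex' gives exactly that order (toLex is the identity on the data).
def normalize_attachment_pair_key_py (pairs : Option (List (Int × Int))) : List (Int × Int) :=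
  PySem.List.sorted
    (PySem.Set.ofList ((pairs.getD []).map (fun p => (p.1, p.2))))
    (fun p => toLex p) false

-- ===== PORT B =====
-- B's helper _insert_sorted_unique, step for step ('item < head' is Python's
-- lexicographic tuple comparison, i.e. toLex item < toLex head).
def pvInsert : List (Int × Int) → (Int × Int) → List (Int × Int)
  | [], item => [item]
  | head :: t, item =>
    if toLex item < toLex head then item :: head :: t
    else if item = head then head :: t
    else head :: pvInsert t item

def normalize_attachment_pair_key_py_alt (pairs : Option (List (Int × Int))) : List (Int × Int) :=
  ((pairs.getD []).map (fun p => (p.1, p.2))).foldl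
    (fun result p => pvInsert result p) []

-- ===== PRECONDITION & SPEC =====
def Spec_normalize_attachment_pair_key_py (pairs : Option (List (Int × Int))) (out : List (Int × Int)) : Prop := out = normalize_attachment_pair_key_py_alt pairs
instance (pairs : Option (List (Int × Int))) (out : List (Int × Int)) : Decidable (Spec_normalize_attachment_pair_key_py pairs out) := by unfold Spec_normalize_attachment_pair_key_py; infer_instance

-- ===== CLAIM =====
def Claim_equal_normalize_attachment_pair_key_py : Prop := ∀ (pairs : Option (List (Int × Int))), Dom_normalize_attachment_pair_key_py pairs → Spec_normalize_attachment_pair_key_py pairs (normalize_attachment_pair_key_py pairs)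

-- ===== LEMMAS AND PROOFS =====

theorem pv_mem_insert (res : List (Int × Int)) (x : Int × Int) :
    ∀ y, y ∈ pvInsert res x ↔ y = x ∨ y ∈ res := by
  induction res with
  | nil => intro y; simp [pvInsert]
  | cons h t ih =>
    intro y
    by_cases h1 : toLex x < toLex h
    · simp only [pvInsert, if_pos h1, List.mem_cons]
    · by_cases h2 : x = h
      · subst h2
        simp only [pvInsert, if_neg h1, reduceIte, List.mem_cons]
        tauto
      · simp only [pvInsert, if_neg h1, if_neg h2, List.mem_cons, ih y]
        tauto

theorem pv_pairwise_insert (res : List (Int × Int)) (x : Int × Int)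
    (hpw : res.Pairwise (fun a b => toLex a < toLex b)) :
    (pvInsert res x).Pairwise (fun a b => toLex a < toLex b) := by
  induction res with
  | nil => simp [pvInsert]
  | cons h t ih =>
    obtain ⟨hh, ht⟩ := List.pairwise_cons.mp hpw
    by_cases h1 : toLex x < toLex h
    · simp only [pvInsert, if_pos h1]
      refine List.pairwise_cons.mpr ⟨?_, hpw⟩
      intro b hb
      rcases List.mem_cons.mp hb with rfl | hb
      · exact h1
      · exact lt_trans h1 (hh b hb)
    · by_cases h2 : x = h
      · simp only [pvInsert, if_neg h1, if_pos h2]; exact hpw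
      · have hhx : toLex h < toLex x := by
          rcases lt_trichotomy (toLex h) (toLex x) with h3 | h3 | h3
          · exact h3
          · exact absurd (toLex.injective h3).symm h2
          · exact absurd h3 h1
        simp only [pvInsert, if_neg h1, if_neg h2]
        refine List.pairwise_cons.mpr ⟨?_, ih ht⟩
        intro b hb
        rcases (pv_mem_insert t x b).mp hb with rfl | hb
        · exact hhx
        · exact hh b hb

theorem pv_fold_spec (l : List (Int × Int)) : ∀ (res : List (Int × Int)),
    res.Pairwise (fun a b => toLex a < toLex b) →
    (l.foldl (fun r p => pvInsert r p) res).Pairwise (fun a b => toLex a < toLex b) ∧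
    (∀ y, y ∈ l.foldl (fun r p => pvInsert r p) res ↔ y ∈ res ∨ y ∈ l) := by
  induction l with
  | nil => intro res h; exact ⟨h, by simp⟩
  | cons x t ih =>
    intro res h
    obtain ⟨ipw, imem⟩ := ih (pvInsert res x) (pv_pairwise_insert res x h)
    refine ⟨ipw, ?_⟩
    intro y
    rw [List.foldl_cons] at *
    rw [imem y, pv_mem_insert res x y]
    simp only [List.mem_cons]; tauto

theorem pv_key (l : List (Int × Int)) :
    PySem.List.sorted (PySem.Set.ofList l) (fun p => toLex p) false
    = l.foldl (fun r p => pvInsert r p) [] := by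
  obtain ⟨hpw, hmem⟩ := pv_fold_spec l [] (by simp)
  apply PySem.List.sorted_eq_of_perm_of_pairwise_lt
  · have hn1 : (l.foldl (fun r p => pvInsert r p) []).Nodup :=
      hpw.imp (fun {a b} h => fun he => by subst he; exact lt_irrefl _ h)
    apply List.perm_of_nodup_nodup_toFinset_eq hn1 (PySem.Set.nodup_ofList l)
    ext y
    simp [PySem.Set.mem_ofList, hmem y]
  · exact hpw

-- ===== VERDICT =====
theorem normalize_attachment_pair_key_py_spec : Claim_equal_normalize_attachment_pair_key_py := by
  intro pairs _
  unfold Spec_normalize_attachment_pair_key_py normalize_attachment_pair_key_py normalize_attachment_pair_key_py_alt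
  exact pv_key ((pairs.getD []).map (fun p => (p.1, p.2)))
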